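-- pv_equiv track=rewrite | github.com/matejbolta/advent-of-code-2020 | 2020/src/day14.py | vstavi_x
-- ===== SOURCE A (Python) =====
-- def vstavi_x(s, perm):
--   assert len(perm) == s.count('X')
--   p = [a for a in perm]
--   koncni = ''
--   indeks = 0
--   for znak in s:
--     if znak == 'X':
--       koncni += p[indeks]
--       indeks += 1
--     else:
--       koncni += znak
--
--   return koncni
-- ===== SOURCE B (Python) =====
-- def vstavi_x(s, perm):
--   assert len(perm) == s.count('X')
--   parts = s.split('X')
--   return ''.join(part + ch for part, ch in zip(parts, perm)) + parts[-1]
-- ===== Notes on version B (the rewrite author's own statement) =====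
-- stated objective: simpler
-- what changed: Replaces the character-by-character loop with an explicit running index into perm by splitting the string at every 'X' once and interleaving the segments with the perm strings via zip/join.
import Mathlib
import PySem

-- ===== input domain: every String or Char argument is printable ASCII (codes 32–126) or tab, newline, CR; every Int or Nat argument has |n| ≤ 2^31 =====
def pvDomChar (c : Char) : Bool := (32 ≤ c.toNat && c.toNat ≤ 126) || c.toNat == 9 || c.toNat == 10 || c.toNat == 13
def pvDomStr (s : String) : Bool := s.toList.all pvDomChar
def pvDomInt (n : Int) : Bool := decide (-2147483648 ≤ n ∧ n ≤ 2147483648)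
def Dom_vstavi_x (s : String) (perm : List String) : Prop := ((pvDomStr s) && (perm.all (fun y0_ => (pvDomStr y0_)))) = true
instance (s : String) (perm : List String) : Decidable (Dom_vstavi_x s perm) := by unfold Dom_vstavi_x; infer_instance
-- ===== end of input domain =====

-- B replaces A's per-character loop with its running index into perm by a single split on 'X'
-- followed by a zip/join interleave of the segments with the perm strings (objective: simpler).

-- ===== PORT A =====
-- the assert becomes the outer guard (on its failure Python raises AssertionError: excluded by Pre_);
-- the loop is a foldl over the characters with state (koncni, indeks); strings are handled as
-- char lists so the kernel can evaluate the concatenations.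
def vstavi_x (s : String) (perm : List String) : String :=
  if perm.length = PySem.Str.count s "X" then
    let p : List (List Char) := perm.map String.toList   -- p = [a for a in perm]
    String.ofList
      ((s.toList.foldl
        (fun (st : List Char × Int) znak =>
          if znak = 'X' then (st.1 ++ PySem.List.pyGetD p st.2 [], st.2 + 1)
          else (st.1 ++ [znak], st.2))
        ([], 0)).1)
  else ""

-- ===== PORT B =====
def vstavi_x_alt (s : String) (perm : List String) : String :=
  if perm.length = PySem.Str.count s "X" then
    let parts := PySem.Chars.splitOn s.toList ['X']      -- parts = s.split('X')
    String.ofList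
      (PySem.Chars.join []
        ((parts.zip (perm.map String.toList)).map (fun pc => pc.1 ++ pc.2))
        ++ parts.getLastD [])                             -- ''.join(part+ch …) + parts[-1]
  else ""

-- ===== PRECONDITION & SPEC =====
-- Pre_ excludes exactly the inputs on which A's assert fails (Python raises AssertionError there).
def Pre_vstavi_x (s : String) (perm : List String) : Prop :=
  perm.length = PySem.Str.count s "X"
instance (s : String) (perm : List String) : Decidable (Pre_vstavi_x s perm) := by
  unfold Pre_vstavi_x; infer_instance
def pvWitness_vstavi_x : String × List String := ("aXbXc", ["u", "vw"])

def Spec_vstavi_x (s : String) (perm : List String) (out : String) : Prop := out = vstavi_x_alt s perm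
instance (s : String) (perm : List String) (out : String) : Decidable (Spec_vstavi_x s perm out) := by unfold Spec_vstavi_x; infer_instance

-- ===== CLAIM (what is proved, stated in full; the proofs are below) =====
def Claim_equal_vstavi_x : Prop := ∀ (s : String) (perm : List String), Dom_vstavi_x s perm → Pre_vstavi_x s perm → Spec_vstavi_x s perm (vstavi_x s perm)

-- ===== LEMMAS AND PROOFS =====

-- clean structural recursion equal to splitting a char list at every 'X'
def splitX : List Char → List (List Char)
  | [] => [[]]
  | c :: cs => if c = 'X' then [] :: splitX cs else (splitX cs).modifyHead (c :: ·)

-- reference interleaving: A's loop with the index replaced by consuming the perm list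
def interl : List Char → List (List Char) → List Char
  | [], _ => []
  | c :: cs, ps => if c = 'X' then ps.headD [] ++ interl cs ps.tail else c :: interl cs ps

theorem splitX_ne_nil (cs : List Char) : splitX cs ≠ [] := by
  induction cs with
  | nil => simp [splitX]
  | cons c cs ih =>
    simp only [splitX]
    split_ifs
    · simp
    · cases h : splitX cs with
      | nil => exact absurd h ih
      | cons a l => simp

theorem length_splitX (cs : List Char) : (splitX cs).length = cs.count 'X' + 1 := by
  induction cs with
  | nil => simp [splitX]
  | cons c cs ih =>
    simp only [splitX]
    split_ifs with h
    · simp [h, ih]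
    · simpa [List.count_cons, h] using ih

theorem countgo_eq (fuel : Nat) (l : List Char) (acc : Nat) (h : l.length ≤ fuel) :
    PySem.Chars.count.go ['X'] fuel l acc = acc + l.count 'X' := by
  induction fuel generalizing l acc with
  | zero =>
    interval_cases hl : l.length
    rw [List.length_eq_zero_iff] at hl
    subst hl
    simp [PySem.Chars.count.go]
  | succ f ih =>
    cases l with
    | nil => simp [PySem.Chars.count.go]
    | cons c t =>
      simp only [PySem.Chars.count.go, List.isPrefixOf_cons₂]
      by_cases hc : c = 'X'
      · simp only [hc, beq_self_eq_true, List.isPrefixOf_nil_left, Bool.true_and, if_true,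
          List.length_cons, List.length_nil, List.drop_succ_cons, List.drop_zero]
        rw [ih t (acc + 1) (by simpa using Nat.le_of_succ_le_succ h)]
        simp
        omega
      · rw [if_neg (by simp [Ne.symm hc])]
        rw [ih t acc (by simpa using Nat.le_of_succ_le_succ h)]
        simp [hc]

theorem count_X (l : List Char) : PySem.Chars.count l ['X'] = l.count 'X' := by
  rw [PySem.Chars.count]
  simp only [List.isEmpty_cons, if_false, Bool.false_eq_true]
  simpa using countgo_eq l.length l 0 le_rfl

theorem join_nil_cons (a : List Char) (l : List (List Char)) :
    PySem.Chars.join [] (a :: l) = a ++ PySem.Chars.join [] l := by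
  cases l with
  | nil => simp [PySem.Chars.join_singleton, PySem.Chars.join_nil]
  | cons b r => simp [PySem.Chars.join_cons_cons]

theorem splitgo_eq (fuel : Nat) (l cur : List Char) (acc : List (List Char))
    (h : l.length < fuel) :
    PySem.Chars.splitOn.go ['X'] fuel l cur acc
      = acc.reverse ++ (splitX l).modifyHead (cur.reverse ++ ·) := by
  induction fuel generalizing l cur acc with
  | zero => omega
  | succ f ih =>
    cases l with
    | nil => simp [PySem.Chars.splitOn.go, splitX]
    | cons c t =>
      simp only [PySem.Chars.splitOn.go, List.isPrefixOf_cons₂]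
      by_cases hc : c = 'X'
      · simp only [hc, beq_self_eq_true, List.isPrefixOf_nil_left, Bool.true_and, if_true,
          List.length_cons, List.length_nil, List.drop_succ_cons, List.drop_zero]
        rw [ih t [] (cur.reverse :: acc) (by simpa using Nat.lt_of_succ_lt_succ h)]
        simp [splitX]
        cases splitX t <;> simp [List.modifyHead]
      · rw [if_neg (by simp [Ne.symm hc])]
        rw [ih t (c :: cur) acc (by simpa using Nat.lt_of_succ_lt_succ h)]
        cases hs : splitX t with
        | nil => exact absurd hs (splitX_ne_nil t)
        | cons a r => simp [splitX, hc, hs, List.modifyHead]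

theorem splitOn_eq_splitX (l : List Char) :
    PySem.Chars.splitOn l ['X'] = splitX l := by
  rw [PySem.Chars.splitOn, splitgo_eq (l.length + 1) l [] [] (Nat.lt_succ_self _)]
  cases hs : splitX l with
  | nil => exact absurd hs (splitX_ne_nil l)
  | cons a r => simp [List.modifyHead]

theorem pyGetD_eq_headD_drop (P : List (List Char)) (i : Nat) :
    PySem.List.pyGetD P (i : Int) [] = (P.drop i).headD [] := by
  rw [PySem.List.pyGetD_natCast]
  induction P generalizing i with
  | nil => simp [List.getD]
  | cons a l ih =>
    cases i with
    | zero => simp [List.getD]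
    | succ j => simpa [List.getD] using ih j

theorem foldA_eq (P : List (List Char)) (cs : List Char) (acc : List Char) (i : Nat) :
    (cs.foldl
      (fun (st : List Char × Int) znak =>
        if znak = 'X' then (st.1 ++ PySem.List.pyGetD P st.2 [], st.2 + 1)
        else (st.1 ++ [znak], st.2))
      (acc, (i : Int))).1 = acc ++ interl cs (P.drop i) := by
  induction cs generalizing acc i with
  | nil => simp [interl]
  | cons c cs ih =>
    simp only [List.foldl_cons, interl]
    by_cases hc : c = 'X'
    · rw [if_pos hc, if_pos hc]
      have : ((i : Int) + 1) = ((i + 1 : Nat) : Int) := by push_cast; ring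
      rw [this, ih]
      rw [pyGetD_eq_headD_drop]
      simp [List.tail_drop, List.append_assoc]
    · rw [if_neg hc, if_neg hc, ih]
      simp [List.append_assoc]

theorem interl_eq (cs : List Char) (P : List (List Char)) (h : cs.count 'X' = P.length) :
    PySem.Chars.join [] (((splitX cs).zip P).map (fun pc => pc.1 ++ pc.2))
        ++ (splitX cs).getLastD []
      = interl cs P := by
  induction cs generalizing P with
  | nil =>
    simp only [List.count_nil] at h
    obtain rfl : P = [] := by cases P <;> simp_all
    simp [splitX, interl, PySem.Chars.join_nil]
  | cons c cs ih =>
    by_cases hc : c = 'X'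
    · subst hc
      simp only [List.count_cons_self] at h
      cases P with
      | nil => simp at h
      | cons q P' =>
        have hsX : splitX ('X' :: cs) = [] :: splitX cs := by simp [splitX]
        have hiX : interl ('X' :: cs) (q :: P') = q ++ interl cs P' := by simp [interl]
        rw [hsX, hiX, List.zip_cons_cons, List.map_cons, List.nil_append, join_nil_cons]
        cases hs : splitX cs with
        | nil => exact absurd hs (splitX_ne_nil cs)
        | cons a r =>
          have := ih P' (by simpa using h)
          rw [hs] at this
          rw [List.getLastD_cons]
          simpa [List.append_assoc] using congrArg (fun t => q ++ t) this
    · simp only [splitX, if_neg hc, interl]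
      simp [hc] at h
      cases hs : splitX cs with
      | nil => exact absurd hs (splitX_ne_nil cs)
      | cons a r =>
        have hlen := length_splitX cs
        rw [hs] at hlen
        simp only [List.length_cons] at hlen
        cases r with
        | nil =>
          -- one segment: cs has no 'X', so P = []
          have hcs : cs.count 'X' = 0 := by simp at hlen; omega
          have hP : P = [] := List.length_eq_zero_iff.mp (by omega)
          subst hP
          have := ih [] (by simpa using hcs)
          rw [hs] at this
          simp only [List.zip_nil_right, List.map_nil, PySem.Chars.join_nil,
            List.nil_append] at this ⊢
          simp [List.modifyHead, ← this]
        | cons b r' =>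
          -- at least two segments: cs contains an 'X', so P is nonempty
          cases P with
          | nil =>
            exfalso
            simp only [List.length_cons, List.length_nil] at hlen h
            omega
          | cons q P' =>
            have := ih (q :: P') h
            rw [hs] at this
            simp only [List.modifyHead, List.zip_cons_cons, List.map_cons,
              List.getLastD_cons] at this ⊢
            rw [join_nil_cons] at this ⊢
            simp only [List.cons_append, List.append_assoc] at this ⊢
            rw [this]

-- ===== VERDICT (by name: the statement is the Claim_ definition above) =====
theorem vstavi_x_spec : Claim_equal_vstavi_x := by
  intro s perm _ hpre
  unfold Spec_vstavi_x
  unfold Pre_vstavi_x at hpre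
  simp only [vstavi_x, vstavi_x_alt, if_pos hpre]
  have hf := foldA_eq (perm.map String.toList) s.toList [] 0
  simp only [Int.natCast_zero, List.drop_zero, List.nil_append] at hf
  rw [hf, splitOn_eq_splitX, interl_eq]
  rw [← count_X]
  simpa [PySem.Str.count_eq] using hpre.symm
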